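-- pv_equiv track=rewrite | github.com/Pranjal-wq/major-project | input/00000021.py | control_flow_flattening
-- ===== SOURCE A (Python) =====
-- def control_flow_flattening(x):
--     state = 0
--     while True:
--         if state == 0:
--             if x > 0:
--                 state = 1
--             else:
--                 state = 2
--         elif state == 1:
--             return x * 2
--         elif state == 2:
--             return -x
-- ===== SOURCE B (Python) =====
-- def control_flow_flattening(x):
--     # branch-free closed form: |x| + max(x, 0) equals 2x for x>0 and -x otherwise
--     return abs(x) + max(x, 0)
-- ===== Notes on version B (the rewrite author's own statement) =====
-- stated objective: alternative
-- what changed: Replaces A's state-machine loop with a branch-free arithmetic closed form abs(x) + max(x, 0), eliminating both the loop and all conditional control flow.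
import Mathlib
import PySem

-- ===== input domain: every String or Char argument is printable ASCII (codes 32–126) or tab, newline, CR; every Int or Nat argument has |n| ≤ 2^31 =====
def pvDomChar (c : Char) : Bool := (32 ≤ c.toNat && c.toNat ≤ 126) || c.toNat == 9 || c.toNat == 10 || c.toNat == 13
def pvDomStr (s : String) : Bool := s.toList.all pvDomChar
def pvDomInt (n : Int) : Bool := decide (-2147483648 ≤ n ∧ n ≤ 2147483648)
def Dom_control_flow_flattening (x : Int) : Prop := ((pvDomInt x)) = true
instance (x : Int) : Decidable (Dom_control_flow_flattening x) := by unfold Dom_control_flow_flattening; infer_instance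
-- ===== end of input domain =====

-- B replaces A's state-machine loop by the branch-free closed form |x| + max(x,0); same values.
-- ===== PORT A =====
-- transliteration of A's 'while True' state machine: fuel-bounded loop over the state
-- register (fuel 2 suffices: state 0 transitions once, states 1/2 return); .getD 0 is unreachable.
def cffLoop (x : Int) : Nat → Int → Option Int
  | 0, _ => none
  | n + 1, state =>
    if state = 0 then
      cffLoop x n (if x > 0 then 1 else 2)
    else if state = 1 then
      some (x * 2)
    else if state = 2 then
      some (-x)
    else
      cffLoop x n state

def control_flow_flattening (x : Int) : Int :=
  (cffLoop x 2 0).getD 0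

-- ===== PORT B =====
def control_flow_flattening_alt (x : Int) : Int :=
  |x| + max x 0

-- ===== PRECONDITION & SPEC =====
def Spec_control_flow_flattening (x : Int) (out : Int) : Prop := out = control_flow_flattening_alt x
instance (x : Int) (out : Int) : Decidable (Spec_control_flow_flattening x out) := by unfold Spec_control_flow_flattening; infer_instance

-- ===== CLAIM (what is proved, stated in full; the proofs are below) =====
def Claim_equal_control_flow_flattening : Prop := ∀ (x : Int), Dom_control_flow_flattening x → Spec_control_flow_flattening x (control_flow_flattening x)

-- ===== LEMMAS AND PROOFS =====

-- ===== VERDICT (by name: the statement is the Claim_ definition above) =====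
theorem control_flow_flattening_spec : Claim_equal_control_flow_flattening := by
  intro x _
  unfold Spec_control_flow_flattening control_flow_flattening control_flow_flattening_alt
  by_cases h : x > 0
  · simp [cffLoop, h, abs_of_pos h]; omega
  · simp [cffLoop, h, abs_of_nonpos (not_lt.mp h), max_eq_right (not_lt.mp h)]
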